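-- pv_equiv track=rewrite | github.com/Patrone411/waymo_scenario_extraction | scenario_extraction/scenario_matching/matching/spec.py | _step_skip_zero
-- ===== SOURCE A (Python) =====
-- def _step_skip_zero(L0: int, steps: int, sgn: int) -> int:
--     if steps <= 0: return L0
--     L, moved = L0, 0
--     while moved < steps:
--         L += sgn
--         if L == 0:
--             L += sgn
--         moved += 1
--     return L
-- ===== SOURCE B (Python) =====
-- def _step_skip_zero(L0: int, steps: int, sgn: int) -> int:
--     if steps <= 0 or sgn == 0:
--         return L0
--     base = L0 + steps * sgn
--     q, r = divmod(-L0, sgn)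
--     return base + sgn if r == 0 and 1 <= q <= steps else base
-- ===== Notes on version B (the rewrite author's own statement) =====
-- stated objective: faster
-- what changed: Replaced the per-step while loop (add sgn, skip zero) by closed-form arithmetic: L0 + steps*sgn plus one extra sgn iff the progression lands exactly on zero within the first steps steps (divmod test).
import Mathlib
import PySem

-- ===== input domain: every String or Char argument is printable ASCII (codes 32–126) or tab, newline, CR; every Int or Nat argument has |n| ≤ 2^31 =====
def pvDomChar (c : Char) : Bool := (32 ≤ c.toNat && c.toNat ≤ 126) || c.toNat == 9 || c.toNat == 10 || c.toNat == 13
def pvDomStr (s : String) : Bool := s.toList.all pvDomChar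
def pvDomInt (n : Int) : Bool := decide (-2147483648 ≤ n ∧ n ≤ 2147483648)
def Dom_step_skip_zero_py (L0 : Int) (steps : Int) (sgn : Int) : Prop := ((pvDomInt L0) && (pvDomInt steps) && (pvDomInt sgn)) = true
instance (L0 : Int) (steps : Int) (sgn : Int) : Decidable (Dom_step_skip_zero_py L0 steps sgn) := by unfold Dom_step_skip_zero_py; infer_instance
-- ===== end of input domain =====

-- B replaces A's step-by-step loop with O(1) closed-form arithmetic: L0 + steps*sgn, plus one
-- extra sgn when the arithmetic progression would land exactly on zero within the first `steps` steps.

-- ===== PORT A =====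
-- the while loop of A, run once per remaining step (fuel = steps - moved)
def stepLoopA (L : Int) (sgn : Int) : Nat → Int
  | 0 => L
  | n + 1 =>
    let L1 := L + sgn
    let L2 := if L1 = 0 then L1 + sgn else L1
    stepLoopA L2 sgn n

def step_skip_zero_py (L0 : Int) (steps : Int) (sgn : Int) : Int :=
  if steps ≤ 0 then L0 else stepLoopA L0 sgn steps.toNat

-- ===== PORT B =====
def step_skip_zero_py_alt (L0 : Int) (steps : Int) (sgn : Int) : Int :=
  if steps ≤ 0 ∨ sgn = 0 then L0
  else
    let base := L0 + steps * sgn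
    let q := PySem.Int.floordiv (-L0) sgn
    let r := PySem.Int.mod (-L0) sgn
    if r = 0 ∧ 1 ≤ q ∧ q ≤ steps then base + sgn else base

-- ===== PRECONDITION & SPEC =====
def Spec_step_skip_zero_py (L0 : Int) (steps : Int) (sgn : Int) (out : Int) : Prop := out = step_skip_zero_py_alt L0 steps sgn
instance (L0 : Int) (steps : Int) (sgn : Int) (out : Int) : Decidable (Spec_step_skip_zero_py L0 steps sgn out) := by unfold Spec_step_skip_zero_py; infer_instance

-- ===== CLAIM (what is proved, stated in full; the proofs are below) =====
def Claim_equal_step_skip_zero_py : Prop := ∀ (L0 : Int) (steps : Int) (sgn : Int), Dom_step_skip_zero_py L0 steps sgn → Spec_step_skip_zero_py L0 steps sgn (step_skip_zero_py L0 steps sgn)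

-- ===== LEMMAS AND PROOFS =====

theorem stepLoopA_zero_sgn (L : Int) (n : Nat) : stepLoopA L 0 n = L := by
  induction n generalizing L with
  | zero => rfl
  | succ n ih =>
    simp only [stepLoopA, add_zero]
    split_ifs with h
    · simp [h, ih]
    · exact ih L

theorem stepLoopA_no_hit (L sgn : Int) (n : Nat)
    (h : ∀ k : Nat, 1 ≤ k → k ≤ n → L + (k : Int) * sgn ≠ 0) :
    stepLoopA L sgn n = L + (n : Int) * sgn := by
  induction n generalizing L with
  | zero => simp [stepLoopA]
  | succ n ih =>
    have h1 : L + sgn ≠ 0 := by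
      have := h 1 (by omega) (by omega); simpa using this
    simp only [stepLoopA, if_neg h1]
    have := ih (L + sgn) (by
      intro k hk1 hkn
      have := h (k + 1) (by omega) (by omega)
      push_cast at this ⊢
      intro hc; apply this; linarith)
    rw [this]; push_cast; ring

theorem stepLoopA_hit (L sgn : Int) (hs : sgn ≠ 0) (n : Nat)
    (h : ∃ k : Nat, 1 ≤ k ∧ k ≤ n ∧ L + (k : Int) * sgn = 0) :
    stepLoopA L sgn n = L + (n : Int) * sgn + sgn := by
  induction n generalizing L with
  | zero => obtain ⟨k, h1, h2, _⟩ := h; omega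
  | succ n ih =>
    by_cases h1 : L + sgn = 0
    · simp only [stepLoopA, if_pos h1]
      have hnh : ∀ k : Nat, 1 ≤ k → k ≤ n → (L + sgn + sgn) + (k : Int) * sgn ≠ 0 := by
        intro k hk1 hkn hc
        have : ((k : Int) + 1) * sgn = 0 := by linarith [h1]
        rcases mul_eq_zero.mp this with h' | h'
        · omega
        · exact hs h'
      rw [stepLoopA_no_hit _ _ _ hnh]; push_cast; ring
    · simp only [stepLoopA, if_neg h1]
      obtain ⟨k, hk1, hkn, hk0⟩ := h
      have hk2 : 2 ≤ k := by
        rcases Nat.lt_or_ge k 2 with hlt | hge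
        · interval_cases k
          · exfalso; apply h1; simpa using hk0
        · exact hge
      have := ih (L + sgn) ⟨k - 1, by omega, by omega, by
        push_cast [Nat.cast_sub (by omega : 1 ≤ k)]
        linarith [hk0]⟩
      rw [this]; push_cast; ring

-- the B-side condition is exactly "the progression hits zero within steps steps"
theorem hit_iff (L0 sgn : Int) (hs : sgn ≠ 0) (n : Nat) :
    (PySem.Int.mod (-L0) sgn = 0 ∧ 1 ≤ PySem.Int.floordiv (-L0) sgn ∧ PySem.Int.floordiv (-L0) sgn ≤ (n : Int))
    ↔ (∃ k : Nat, 1 ≤ k ∧ k ≤ n ∧ L0 + (k : Int) * sgn = 0) := by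
  constructor
  · rintro ⟨hr, hq1, hqn⟩
    have hdiv := PySem.Int.floordiv_mul_add_mod (-L0) sgn
    rw [hr, add_zero] at hdiv
    refine ⟨(PySem.Int.floordiv (-L0) sgn).toNat, by omega, by omega, ?_⟩
    rw [Int.toNat_of_nonneg (by omega)]
    linarith [hdiv]
  · rintro ⟨k, hk1, hkn, hk0⟩
    have hdvd : sgn ∣ (-L0) := ⟨(k : Int), by linarith [hk0]⟩
    have hr : PySem.Int.mod (-L0) sgn = 0 := (PySem.Int.mod_eq_zero_iff_dvd _ _).mpr hdvd
    have hdiv := PySem.Int.floordiv_mul_add_mod (-L0) sgn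
    rw [hr, add_zero] at hdiv
    -- -L0 = k * sgn and -L0 = q * sgn ⟹ q = k
    have hq : PySem.Int.floordiv (-L0) sgn = (k : Int) := by
      have : (PySem.Int.floordiv (-L0) sgn - (k : Int)) * sgn = 0 := by
        have : (k : Int) * sgn = -L0 := by linarith [hk0]
        nlinarith [hdiv, this]
      rcases mul_eq_zero.mp this with h' | h'
      · omega
      · exact absurd h' hs
    rw [hq]
    exact ⟨hr, by exact_mod_cast hk1, by exact_mod_cast hkn⟩

-- ===== VERDICT (by name: the statement is the Claim_ definition above) =====
theorem step_skip_zero_py_spec : Claim_equal_step_skip_zero_py := by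
  intro L0 steps sgn _
  unfold Spec_step_skip_zero_py step_skip_zero_py step_skip_zero_py_alt
  by_cases hst : steps ≤ 0
  · simp [hst]
  by_cases hsg : sgn = 0
  · rw [if_neg hst, if_pos (Or.inr hsg), hsg, stepLoopA_zero_sgn]
  rw [if_neg hst, if_neg (by push Not; exact ⟨by omega, hsg⟩)]
  have hn : ((steps.toNat : Nat) : Int) = steps := Int.toNat_of_nonneg (by omega)
  by_cases hc : PySem.Int.mod (-L0) sgn = 0 ∧ 1 ≤ PySem.Int.floordiv (-L0) sgn ∧ PySem.Int.floordiv (-L0) sgn ≤ steps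
  · rw [if_pos hc]
    have hhit := (hit_iff L0 sgn hsg steps.toNat).mp (by rw [hn]; exact hc)
    rw [stepLoopA_hit L0 sgn hsg _ hhit, hn]
  · rw [if_neg hc]
    have hnh : ¬ (∃ k : Nat, 1 ≤ k ∧ k ≤ steps.toNat ∧ L0 + (k : Int) * sgn = 0) := by
      intro hex
      exact hc (by rw [← hn] at *; exact (hit_iff L0 sgn hsg steps.toNat).mpr hex)
    push Not at hnh
    rw [stepLoopA_no_hit L0 sgn steps.toNat (fun k hk1 hkn => hnh k hk1 hkn), hn]
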